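-- pv_equiv track=rewrite | github.com/ndqkhanh/lyra | packages/lyra-cli/src/lyra_cli/cli/commands.py | get_command_category
-- ===== SOURCE A (Python) =====
-- def get_command_category(command: str) -> str:
--     """Get category for a command."""
--     categories = {
--         "conversation": ["/help", "/exit", "/quit", "/clear", "/new", "/history", "/compact", "/search", "/replay"],
--         "models": ["/model", "/models", "/status", "/budget", "/stream", "/config", "/credentials"],
--         "planning": ["/plan", "/approve", "/reject", "/spawn", "/verify", "/mode"],
--         "review": ["/review", "/diff", "/blame", "/map", "/security-review", "/simplify"],
--         "tools": ["/tools", "/skills", "/memory", "/mcp"],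
--         "sessions": ["/session", "/handoff", "/retro", "/export", "/copy", "/resume", "/fork", "/rename"],
--         "teams": ["/team", "/agents", "/agentteams"],
--         "research": ["/research", "/investigate", "/deep-research"],
--         "scheduling": ["/cron", "/schedule", "/loop"],
--         "memory": ["/reflect", "/btw"],
--         "theme": ["/theme", "/color", "/statusline", "/fast", "/focus", "/tui", "/vim", "/sandbox"],
--         "debug": ["/trace", "/self", "/context", "/stats", "/cost", "/badges", "/debug", "/doctor", "/hooks", "/permissions", "/usage"],
--         "advanced": ["/autopilot", "/ultrawork", "/ralph", "/ralplan", "/continue", "/sharpen", "/directive", "/contract", "/batch", "/add-dir", "/pr-comments", "/feedback", "/release-notes", "/logout", "/plugin", "/reload-plugins", "/claude-api"],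
--         "unique": ["/scaling", "/coverage", "/bundle", "/commands", "/keybindings", "/palette", "/soul", "/policy", "/evals", "/auth", "/init", "/rewind", "/redo", "/toolsets", "/wiki", "/voice", "/split", "/pair", "/recap"],
--         "git": ["/commit", "/pr", "/push"],
--     }
--
--     for category, commands in categories.items():
--         if command in commands:
--             return category
--     return "other"
-- ===== SOURCE B (Python) =====
-- # B: a hand-flattened reverse lookup table (command -> category) written out once;
-- # the function body is a single dict .get with default instead of a scan over
-- # per-category lists.
-- _CATEGORY = {
--     "/help": "conversation",
--     "/exit": "conversation",
--     "/quit": "conversation",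
--     "/clear": "conversation",
--     "/new": "conversation",
--     "/history": "conversation",
--     "/compact": "conversation",
--     "/search": "conversation",
--     "/replay": "conversation",
--     "/model": "models",
--     "/models": "models",
--     "/status": "models",
--     "/budget": "models",
--     "/stream": "models",
--     "/config": "models",
--     "/credentials": "models",
--     "/plan": "planning",
--     "/approve": "planning",
--     "/reject": "planning",
--     "/spawn": "planning",
--     "/verify": "planning",
--     "/mode": "planning",
--     "/review": "review",
--     "/diff": "review",
--     "/blame": "review",
--     "/map": "review",
--     "/security-review": "review",
--     "/simplify": "review",
--     "/tools": "tools",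
--     "/skills": "tools",
--     "/memory": "tools",
--     "/mcp": "tools",
--     "/session": "sessions",
--     "/handoff": "sessions",
--     "/retro": "sessions",
--     "/export": "sessions",
--     "/copy": "sessions",
--     "/resume": "sessions",
--     "/fork": "sessions",
--     "/rename": "sessions",
--     "/team": "teams",
--     "/agents": "teams",
--     "/agentteams": "teams",
--     "/research": "research",
--     "/investigate": "research",
--     "/deep-research": "research",
--     "/cron": "scheduling",
--     "/schedule": "scheduling",
--     "/loop": "scheduling",
--     "/reflect": "memory",
--     "/btw": "memory",
--     "/theme": "theme",
--     "/color": "theme",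
--     "/statusline": "theme",
--     "/fast": "theme",
--     "/focus": "theme",
--     "/tui": "theme",
--     "/vim": "theme",
--     "/sandbox": "theme",
--     "/trace": "debug",
--     "/self": "debug",
--     "/context": "debug",
--     "/stats": "debug",
--     "/cost": "debug",
--     "/badges": "debug",
--     "/debug": "debug",
--     "/doctor": "debug",
--     "/hooks": "debug",
--     "/permissions": "debug",
--     "/usage": "debug",
--     "/autopilot": "advanced",
--     "/ultrawork": "advanced",
--     "/ralph": "advanced",
--     "/ralplan": "advanced",
--     "/continue": "advanced",
--     "/sharpen": "advanced",
--     "/directive": "advanced",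
--     "/contract": "advanced",
--     "/batch": "advanced",
--     "/add-dir": "advanced",
--     "/pr-comments": "advanced",
--     "/feedback": "advanced",
--     "/release-notes": "advanced",
--     "/logout": "advanced",
--     "/plugin": "advanced",
--     "/reload-plugins": "advanced",
--     "/claude-api": "advanced",
--     "/scaling": "unique",
--     "/coverage": "unique",
--     "/bundle": "unique",
--     "/commands": "unique",
--     "/keybindings": "unique",
--     "/palette": "unique",
--     "/soul": "unique",
--     "/policy": "unique",
--     "/evals": "unique",
--     "/auth": "unique",
--     "/init": "unique",
--     "/rewind": "unique",
--     "/redo": "unique",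
--     "/toolsets": "unique",
--     "/wiki": "unique",
--     "/voice": "unique",
--     "/split": "unique",
--     "/pair": "unique",
--     "/recap": "unique",
--     "/commit": "git",
--     "/pr": "git",
--     "/push": "git",
-- }
--
--
-- def get_command_category(command: str) -> str:
--     """Get category for a command."""
--     return _CATEGORY.get(command, "other")
-- ===== Notes on version B (the rewrite author's own statement) =====
-- stated objective: alternative
-- what changed: B replaces the category->commands dict and per-call membership scan with a hand-flattened reverse command->category dict literal, so the body is a single dict .get with default.
import Mathlib
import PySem

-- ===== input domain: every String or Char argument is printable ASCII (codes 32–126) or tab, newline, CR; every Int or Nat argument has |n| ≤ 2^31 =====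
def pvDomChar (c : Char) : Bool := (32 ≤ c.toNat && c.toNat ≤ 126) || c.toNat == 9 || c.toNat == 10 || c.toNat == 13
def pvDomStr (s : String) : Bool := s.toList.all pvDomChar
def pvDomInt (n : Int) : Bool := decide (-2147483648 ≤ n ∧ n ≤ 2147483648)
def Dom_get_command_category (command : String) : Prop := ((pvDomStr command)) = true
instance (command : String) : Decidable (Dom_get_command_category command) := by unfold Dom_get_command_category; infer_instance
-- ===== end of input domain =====

-- B replaces the category->commands table and per-call membership scan with a
-- hand-flattened reverse command->category dict literal; the body is a single lookup.

-- ===== PORT A =====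
-- The category table (Python's dict literal, iterated via .items() in insertion
-- order with unique keys = this list, iterated in order).
def pvCategoriesA : List (String × List String) := [
  ("conversation", ["/help", "/exit", "/quit", "/clear", "/new", "/history", "/compact", "/search", "/replay"]),
  ("models", ["/model", "/models", "/status", "/budget", "/stream", "/config", "/credentials"]),
  ("planning", ["/plan", "/approve", "/reject", "/spawn", "/verify", "/mode"]),
  ("review", ["/review", "/diff", "/blame", "/map", "/security-review", "/simplify"]),
  ("tools", ["/tools", "/skills", "/memory", "/mcp"]),
  ("sessions", ["/session", "/handoff", "/retro", "/export", "/copy", "/resume", "/fork", "/rename"]),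
  ("teams", ["/team", "/agents", "/agentteams"]),
  ("research", ["/research", "/investigate", "/deep-research"]),
  ("scheduling", ["/cron", "/schedule", "/loop"]),
  ("memory", ["/reflect", "/btw"]),
  ("theme", ["/theme", "/color", "/statusline", "/fast", "/focus", "/tui", "/vim", "/sandbox"]),
  ("debug", ["/trace", "/self", "/context", "/stats", "/cost", "/badges", "/debug", "/doctor", "/hooks", "/permissions", "/usage"]),
  ("advanced", ["/autopilot", "/ultrawork", "/ralph", "/ralplan", "/continue", "/sharpen", "/directive", "/contract", "/batch", "/add-dir", "/pr-comments", "/feedback", "/release-notes", "/logout", "/plugin", "/reload-plugins", "/claude-api"]),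
  ("unique", ["/scaling", "/coverage", "/bundle", "/commands", "/keybindings", "/palette", "/soul", "/policy", "/evals", "/auth", "/init", "/rewind", "/redo", "/toolsets", "/wiki", "/voice", "/split", "/pair", "/recap"]),
  ("git", ["/commit", "/pr", "/push"])]

-- A's for-loop with early return.
def pvLoopA : List (String × List String) → String → String
  | [], _ => "other"
  | (cat, cs) :: rest, command => if cs.contains command then cat else pvLoopA rest command

def get_command_category (command : String) : String :=
  pvLoopA pvCategoriesA command

-- ===== PORT B =====
def pvTable : List (String × String) := [
  ("/help", "conversation"),
  ("/exit", "conversation"),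
  ("/quit", "conversation"),
  ("/clear", "conversation"),
  ("/new", "conversation"),
  ("/history", "conversation"),
  ("/compact", "conversation"),
  ("/search", "conversation"),
  ("/replay", "conversation"),
  ("/model", "models"),
  ("/models", "models"),
  ("/status", "models"),
  ("/budget", "models"),
  ("/stream", "models"),
  ("/config", "models"),
  ("/credentials", "models"),
  ("/plan", "planning"),
  ("/approve", "planning"),
  ("/reject", "planning"),
  ("/spawn", "planning"),
  ("/verify", "planning"),
  ("/mode", "planning"),
  ("/review", "review"),
  ("/diff", "review"),
  ("/blame", "review"),
  ("/map", "review"),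
  ("/security-review", "review"),
  ("/simplify", "review"),
  ("/tools", "tools"),
  ("/skills", "tools"),
  ("/memory", "tools"),
  ("/mcp", "tools"),
  ("/session", "sessions"),
  ("/handoff", "sessions"),
  ("/retro", "sessions"),
  ("/export", "sessions"),
  ("/copy", "sessions"),
  ("/resume", "sessions"),
  ("/fork", "sessions"),
  ("/rename", "sessions"),
  ("/team", "teams"),
  ("/agents", "teams"),
  ("/agentteams", "teams"),
  ("/research", "research"),
  ("/investigate", "research"),
  ("/deep-research", "research"),
  ("/cron", "scheduling"),
  ("/schedule", "scheduling"),
  ("/loop", "scheduling"),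
  ("/reflect", "memory"),
  ("/btw", "memory"),
  ("/theme", "theme"),
  ("/color", "theme"),
  ("/statusline", "theme"),
  ("/fast", "theme"),
  ("/focus", "theme"),
  ("/tui", "theme"),
  ("/vim", "theme"),
  ("/sandbox", "theme"),
  ("/trace", "debug"),
  ("/self", "debug"),
  ("/context", "debug"),
  ("/stats", "debug"),
  ("/cost", "debug"),
  ("/badges", "debug"),
  ("/debug", "debug"),
  ("/doctor", "debug"),
  ("/hooks", "debug"),
  ("/permissions", "debug"),
  ("/usage", "debug"),
  ("/autopilot", "advanced"),
  ("/ultrawork", "advanced"),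
  ("/ralph", "advanced"),
  ("/ralplan", "advanced"),
  ("/continue", "advanced"),
  ("/sharpen", "advanced"),
  ("/directive", "advanced"),
  ("/contract", "advanced"),
  ("/batch", "advanced"),
  ("/add-dir", "advanced"),
  ("/pr-comments", "advanced"),
  ("/feedback", "advanced"),
  ("/release-notes", "advanced"),
  ("/logout", "advanced"),
  ("/plugin", "advanced"),
  ("/reload-plugins", "advanced"),
  ("/claude-api", "advanced"),
  ("/scaling", "unique"),
  ("/coverage", "unique"),
  ("/bundle", "unique"),
  ("/commands", "unique"),
  ("/keybindings", "unique"),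
  ("/palette", "unique"),
  ("/soul", "unique"),
  ("/policy", "unique"),
  ("/evals", "unique"),
  ("/auth", "unique"),
  ("/init", "unique"),
  ("/rewind", "unique"),
  ("/redo", "unique"),
  ("/toolsets", "unique"),
  ("/wiki", "unique"),
  ("/voice", "unique"),
  ("/split", "unique"),
  ("/pair", "unique"),
  ("/recap", "unique"),
  ("/commit", "git"),
  ("/pr", "git"),
  ("/push", "git")]

-- the dict literal _CATEGORY (keys distinct, insertion order = pvTable); a Python dict
-- literal is exactly Dict.mk of its pair list when the keys are distinct, as here
def pvCategoryB : PySem.Dict String String := PySem.Dict.mk pvTable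

def get_command_category_alt (command : String) : String :=
  pvCategoryB.getD command "other"

-- ===== PRECONDITION & SPEC =====
def Spec_get_command_category (command : String) (out : String) : Prop := out = get_command_category_alt command
instance (command : String) (out : String) : Decidable (Spec_get_command_category command out) := by unfold Spec_get_command_category; infer_instance

-- ===== CLAIM (what is proved, stated in full; the proofs are below) =====
def Claim_equal_get_command_category : Prop := ∀ (command : String), Dom_get_command_category command → Spec_get_command_category command (get_command_category command)

-- ===== LEMMAS AND PROOFS =====

-- first-match lookup with default "other" in a flat (command, category) pair list:
-- the common characterisation both programs are reduced to
def pvFindC : List (String × String) → String → String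
  | [], _ => "other"
  | (c, cat) :: rest, cmd => if c = cmd then cat else pvFindC rest cmd

lemma pvFindC_map_append (cat cmd : String) (cs : List String)
    (rest : List (String × String)) :
    pvFindC (cs.map (fun c => (c, cat)) ++ rest) cmd =
      if cs.contains cmd then cat else pvFindC rest cmd := by
  induction cs with
  | nil => simp
  | cons c t ih =>
    simp only [List.map, List.cons_append, pvFindC, List.contains_cons]
    rcases eq_or_ne c cmd with rfl | hne
    · simp
    · simp [hne, Ne.symm hne, ih]

-- A's loop is first-match lookup in its flattened pair list
lemma pvLoopA_eq_findC (cats : List (String × List String)) (cmd : String) :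
    pvLoopA cats cmd = pvFindC (cats.flatMap (fun p => p.2.map (fun c => (c, p.1)))) cmd := by
  induction cats with
  | nil => simp [pvLoopA, pvFindC]
  | cons p t ih =>
    obtain ⟨cat, cs⟩ := p
    simp only [pvLoopA, List.flatMap_cons, pvFindC_map_append, ih]

-- dict lookup with default in a literal dict is first-match lookup in its pair list
lemma pvMk_getD_eq_findC (ps : List (String × String)) (cmd : String) :
    (PySem.Dict.mk ps).getD cmd "other" = pvFindC ps cmd := by
  induction ps with
  | nil => simp [pvFindC, PySem.Dict.getD_eq_get?_getD, PySem.Dict.get?]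
  | cons p t ih =>
    obtain ⟨c, cat⟩ := p
    rw [PySem.Dict.getD_eq_get?_getD, PySem.Dict.get?_mk_cons]
    rcases eq_or_ne c cmd with rfl | hne
    · simp [pvFindC]
    · simp only [pvFindC, hne, if_false, beq_iff_eq, ← PySem.Dict.getD_eq_get?_getD, ih]

-- A's flattened pair list is exactly B's literal table
lemma pvFlatten_eq_table :
    pvCategoriesA.flatMap (fun p => p.2.map (fun c => (c, p.1))) = pvTable := by decide

-- ===== VERDICT (by name: the statement is the Claim_ definition above) =====
theorem get_command_category_spec : Claim_equal_get_command_category := by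
  intro command _
  unfold Spec_get_command_category get_command_category get_command_category_alt pvCategoryB
  rw [pvLoopA_eq_findC, pvFlatten_eq_table, pvMk_getD_eq_findC]
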